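-- pv_equiv track=rewrite | github.com/byted/AdventOfCode-2021 | 22/solve.py | substract_cube
-- ===== SOURCE A (Python) =====
-- def substract_cube(cube1, cube2):
--     '''
--         Produces a list of regions of cube 1 that do not overlap with cube 2.
--         Repeatedly cuts of non-overlapping cubes from cube 1.
--     '''
--     def split_overlap(cube1, cube2):
--         '''Split cube 1 along the overlap with cube 2. Returns the overlapping part and the non-overlapping one'''
--         no_overlap, overlap = None, None
--         for i in range(0, len(cube1), 2):
--             # left-side overlap
--             if cube2[i+1] >= cube1[i] and cube2[i+1] < cube1[i+1]:
--                 no_overlap = [c for c in cube1]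
--                 no_overlap[i] = cube2[i+1]+1
--
--                 overlap = [c for c in cube1]
--                 overlap[i+1] = cube2[i+1]
--
--             # and the other side
--             elif cube2[i] > cube1[i] and cube2[i] <= cube1[i+1]:
--                 no_overlap = [c for c in cube1]
--                 no_overlap[i+1] = cube2[i]-1
--
--                 overlap = [c for c in cube1]
--                 overlap[i] = cube2[i]
--
--             if overlap is not None:
--                 return [tuple(no_overlap), tuple(overlap)]
--
--         return None, None
--
--     def is_fully_contained(cube1, cube2):
--         '''Return True if cube 1 is fully within the bounds of cube 2'''
--         return cube2[0] <= cube1[0] and cube2[1] >= cube1[1] and cube2[2] <= cube1[2] and cube2[3] >= cube1[3] and cube2[4] <= cube1[4] and cube2[5] >= cube1[5]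
--
--     def has_overlap(cube1, cube2):
--         '''Return True if cube 1 does not overlap with cube 2 at all'''
--         return cube2[0] > cube1[1] or cube2[1] < cube1[0] or cube2[2] > cube1[3] or cube2[3] < cube1[2] or cube2[4] > cube1[5] or cube2[5] < cube1[4]
--
--     new_cubes = []
--     curr_cube = cube1
--     while True:
--         if has_overlap(curr_cube, cube2):
--             new_cubes.append(curr_cube)
--             return new_cubes
--         if is_fully_contained(curr_cube, cube2):
--             return new_cubes
--
--         no_overlap_cube, curr_cube = split_overlap(curr_cube, cube2)
--         if curr_cube is not None:
--             new_cubes.append(no_overlap_cube)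
-- ===== SOURCE B (Python) =====
-- def substract_cube(cube1, cube2):
--     '''Single pass over the three axes: peel the right slab then the left slab
--     off a shrinking remainder box instead of repeatedly re-scanning.'''
--     if cube2[0] > cube1[1] or cube2[1] < cube1[0] or cube2[2] > cube1[3] \
--             or cube2[3] < cube1[2] or cube2[4] > cube1[5] or cube2[5] < cube1[4]:
--         return [cube1]
--     pieces = []
--     r = list(cube1)
--     for i in (0, 2, 4):
--         if cube2[i+1] >= r[i] and cube2[i+1] < r[i+1]:
--             slab = list(r)
--             slab[i] = cube2[i+1] + 1
--             pieces.append(tuple(slab))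
--             r[i+1] = cube2[i+1]
--         if cube2[i] > r[i] and cube2[i] <= r[i+1]:
--             slab = list(r)
--             slab[i+1] = cube2[i] - 1
--             pieces.append(tuple(slab))
--             r[i] = cube2[i]
--     return pieces
-- ===== Notes on version B (the rewrite author's own statement) =====
-- stated objective: simpler
-- what changed: A's while-True loop re-tests overlap and containment and re-scans all axes from the start after every cut; B makes one pass over the three axes, peeling the right slab and then the left slab off a shrinking remainder box, with a single up-front no-overlap test.
import Mathlib
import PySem

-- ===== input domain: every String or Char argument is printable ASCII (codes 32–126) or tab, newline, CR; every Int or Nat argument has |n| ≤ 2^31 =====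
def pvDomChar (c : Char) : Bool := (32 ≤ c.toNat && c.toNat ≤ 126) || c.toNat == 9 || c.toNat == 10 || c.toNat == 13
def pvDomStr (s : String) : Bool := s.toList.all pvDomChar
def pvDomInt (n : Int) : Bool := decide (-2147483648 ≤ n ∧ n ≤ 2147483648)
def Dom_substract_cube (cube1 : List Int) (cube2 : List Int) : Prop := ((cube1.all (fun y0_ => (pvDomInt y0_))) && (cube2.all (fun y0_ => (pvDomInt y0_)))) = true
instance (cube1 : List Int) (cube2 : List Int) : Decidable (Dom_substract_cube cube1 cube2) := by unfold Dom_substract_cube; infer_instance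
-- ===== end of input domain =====

-- B replaces A's rescanning while-loop (re-testing overlap/containment and re-scanning all axes after
-- every cut) by a single pass over the three axes that peels the right slab then the left slab off a
-- shrinking remainder box; objective: simpler.

-- ===== PORT A =====
-- indexing helper: Python xs[i] for the non-negative in-range indices used here (Pre_ guarantees in range)
def scGet (xs : List Int) (i : Nat) : Int := xs.getD i 0

abbrev sc_hasOverlap (c1 c2 : List Int) : Prop :=
  scGet c2 0 > scGet c1 1 ∨ scGet c2 1 < scGet c1 0 ∨ scGet c2 2 > scGet c1 3 ∨
  scGet c2 3 < scGet c1 2 ∨ scGet c2 4 > scGet c1 5 ∨ scGet c2 5 < scGet c1 4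

abbrev sc_contained (c1 c2 : List Int) : Prop :=
  scGet c2 0 ≤ scGet c1 0 ∧ scGet c2 1 ≥ scGet c1 1 ∧ scGet c2 2 ≤ scGet c1 2 ∧
  scGet c2 3 ≥ scGet c1 3 ∧ scGet c2 4 ≤ scGet c1 4 ∧ scGet c2 5 ≥ scGet c1 5

-- the for-loop of split_overlap over range(0, len(cube1), 2), returning at the first splitting axis
def sc_split_go (c1 c2 : List Int) : List Nat → Option (List Int × List Int)
  | [] => none
  | i :: rest =>
    if scGet c2 (i+1) ≥ scGet c1 i ∧ scGet c2 (i+1) < scGet c1 (i+1) then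
      some (c1.set i (scGet c2 (i+1) + 1), c1.set (i+1) (scGet c2 (i+1)))
    else if scGet c2 i > scGet c1 i ∧ scGet c2 i ≤ scGet c1 (i+1) then
      some (c1.set (i+1) (scGet c2 i - 1), c1.set i (scGet c2 i))
    else sc_split_go c1 c2 rest

-- range(0, len(cube1), 2); the indices are non-negative, so Int.toNat is exact
def sc_split (c1 c2 : List Int) : Option (List Int × List Int) :=
  sc_split_go c1 c2 ((PySem.List.pyRange 0 (c1.length : Int) 2).map Int.toNat)

-- the 'while True' loop; fuel 13: each axis fires each of its two cut branches at most once (≤ 6 cuts)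
def sc_loop : Nat → List (List Int) → List Int → List Int → List (List Int)
  | 0, acc, _, _ => acc            -- never reached with fuel 13
  | n+1, acc, curr, c2 =>
    if sc_hasOverlap curr c2 then acc ++ [curr]
    else if sc_contained curr c2 then acc
    else match sc_split curr c2 with
      | some (no, ov) => sc_loop n (acc ++ [no]) ov c2
      | none => acc                -- Python would raise TypeError next iteration; unreachable, outside Pre_

def substract_cube (cube1 : List Int) (cube2 : List Int) : List (List Int) :=
  sc_loop 13 [] cube1 cube2

-- ===== PORT B =====
-- one axis of B's single pass: peel the right slab, then the left slab, off the remainder box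
def sc_step (c2 : List Int) (st : List (List Int) × List Int) (i : Nat) : List (List Int) × List Int :=
  let st1 :=
    if scGet c2 (i+1) ≥ scGet st.2 i ∧ scGet c2 (i+1) < scGet st.2 (i+1) then
      (st.1 ++ [st.2.set i (scGet c2 (i+1) + 1)], st.2.set (i+1) (scGet c2 (i+1)))
    else st
  if scGet c2 i > scGet st1.2 i ∧ scGet c2 i ≤ scGet st1.2 (i+1) then
    (st1.1 ++ [st1.2.set (i+1) (scGet c2 i - 1)], st1.2.set i (scGet c2 i))
  else st1

def substract_cube_alt (cube1 : List Int) (cube2 : List Int) : List (List Int) :=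
  if scGet cube2 0 > scGet cube1 1 ∨ scGet cube2 1 < scGet cube1 0 ∨ scGet cube2 2 > scGet cube1 3 ∨
     scGet cube2 3 < scGet cube1 2 ∨ scGet cube2 4 > scGet cube1 5 ∨ scGet cube2 5 < scGet cube1 4 then
    [cube1]
  else
    (List.foldl (sc_step cube2) ([], cube1) [0, 2, 4]).1

-- ===== PRECONDITION & SPEC =====
-- Pre_ admits (a) any input on which A's initial no-overlap test short-circuits to True before
-- reading an out-of-range index (A returns [cube1] there, whatever the lengths), and (b) genuine 3-D
-- input: at least six coordinates on each side (on fewer, A raises IndexError once the test needs them)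
-- with non-inverted (non-empty) axis intervals for cube2 unless the boxes do not overlap at all: on
-- overlapping inputs with an inverted cube2 interval A still returns, but which fragments it emits is an
-- accident of its rescanning order, as defensible as any other choice (example in the claim's cites).
def Pre_substract_cube (cube1 : List Int) (cube2 : List Int) : Prop :=
  ((2 ≤ cube1.length ∧ 1 ≤ cube2.length ∧ cube2.getD 0 0 > cube1.getD 1 0) ∨
   (2 ≤ cube1.length ∧ 2 ≤ cube2.length ∧ ¬(cube2.getD 0 0 > cube1.getD 1 0) ∧
    cube2.getD 1 0 < cube1.getD 0 0) ∨
   (2 ≤ cube1.length ∧ 4 ≤ cube1.length ∧ 3 ≤ cube2.length ∧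
    ¬(cube2.getD 0 0 > cube1.getD 1 0) ∧ ¬(cube2.getD 1 0 < cube1.getD 0 0) ∧
    cube2.getD 2 0 > cube1.getD 3 0) ∨
   (4 ≤ cube1.length ∧ 4 ≤ cube2.length ∧
    ¬(cube2.getD 0 0 > cube1.getD 1 0) ∧ ¬(cube2.getD 1 0 < cube1.getD 0 0) ∧
    ¬(cube2.getD 2 0 > cube1.getD 3 0) ∧ cube2.getD 3 0 < cube1.getD 2 0) ∨
   (4 ≤ cube1.length ∧ 6 ≤ cube1.length ∧ 5 ≤ cube2.length ∧
    ¬(cube2.getD 0 0 > cube1.getD 1 0) ∧ ¬(cube2.getD 1 0 < cube1.getD 0 0) ∧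
    ¬(cube2.getD 2 0 > cube1.getD 3 0) ∧ ¬(cube2.getD 3 0 < cube1.getD 2 0) ∧
    cube2.getD 4 0 > cube1.getD 5 0) ∨
   (6 ≤ cube1.length ∧ 6 ≤ cube2.length ∧
    ¬(cube2.getD 0 0 > cube1.getD 1 0) ∧ ¬(cube2.getD 1 0 < cube1.getD 0 0) ∧
    ¬(cube2.getD 2 0 > cube1.getD 3 0) ∧ ¬(cube2.getD 3 0 < cube1.getD 2 0) ∧
    ¬(cube2.getD 4 0 > cube1.getD 5 0) ∧ cube2.getD 5 0 < cube1.getD 4 0)) ∨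
  (6 ≤ cube1.length ∧ 6 ≤ cube2.length ∧
   ((cube2.getD 0 0 > cube1.getD 1 0 ∨ cube2.getD 1 0 < cube1.getD 0 0 ∨
     cube2.getD 2 0 > cube1.getD 3 0 ∨ cube2.getD 3 0 < cube1.getD 2 0 ∨
     cube2.getD 4 0 > cube1.getD 5 0 ∨ cube2.getD 5 0 < cube1.getD 4 0) ∨
    (cube2.getD 0 0 ≤ cube2.getD 1 0 ∧ cube2.getD 2 0 ≤ cube2.getD 3 0 ∧
     cube2.getD 4 0 ≤ cube2.getD 5 0)))
instance (cube1 : List Int) (cube2 : List Int) : Decidable (Pre_substract_cube cube1 cube2) := by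
  unfold Pre_substract_cube; infer_instance

def pvWitness_substract_cube : List Int × List Int := ([0, 10, 0, 10, 0, 10], [2, 3, 2, 3, 2, 3])

def Spec_substract_cube (cube1 : List Int) (cube2 : List Int) (out : List (List Int)) : Prop := out = substract_cube_alt cube1 cube2
instance (cube1 : List Int) (cube2 : List Int) (out : List (List Int)) : Decidable (Spec_substract_cube cube1 cube2 out) := by unfold Spec_substract_cube; infer_instance

-- ===== CLAIM (what is proved, stated in full; the proofs are below) =====
def Claim_equal_substract_cube : Prop := ∀ (cube1 : List Int) (cube2 : List Int), Dom_substract_cube cube1 cube2 → Pre_substract_cube cube1 cube2 → Spec_substract_cube cube1 cube2 (substract_cube cube1 cube2)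

-- ===== LEMMAS AND PROOFS =====

-- evaluating range(0, len, 2) for len ≥ 6: the first three axes are 0, 2, 4
theorem sc_axes (L : Int) (h : 6 ≤ L) :
    (PySem.List.pyRange 0 L 2).map Int.toNat
    = 0 :: 2 :: 4 :: ((PySem.List.pyRange 6 L 2).map Int.toNat) := by
  rw [PySem.List.pyRange_of_pos _ _ (by norm_num), PySem.List.pyRange_of_pos _ _ (by norm_num)]
  have h1 : ((L - 0 + 2 - 1)/2).toNat = 3 + (if (6:Int) < L then ((L - 6 + 2 - 1)/2).toNat else 0) := by
    split_ifs with h' <;> omega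
  rw [if_pos (by omega : (0:Int) < L), h1, List.range_add]
  simp only [List.map_append, List.map_map]
  rw [show (List.range 3) = [0,1,2] from rfl]
  simp only [List.map_cons, List.map_nil, List.cons_append, List.nil_append]
  norm_num
  refine ⟨by omega, by omega, ?_⟩
  intro a _
  omega

theorem sc_axes_cons (x0 x1 x2 x3 x4 x5 : Int) (xr : List Int) :
    (PySem.List.pyRange 0 (((x0::x1::x2::x3::x4::x5::xr).length : Nat) : Int) 2).map Int.toNat
    = 0 :: 2 :: 4 :: ((PySem.List.pyRange 6 (((x0::x1::x2::x3::x4::x5::xr).length : Nat) : Int) 2).map Int.toNat) := by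
  exact sc_axes _ (by simp; omega)

-- one unfolding of A's while-loop when the overlap test fires (generic state)
theorem sc_loop_stop {n : Nat} {acc : List (List Int)} {curr c2 : List Int}
    (hn : 1 ≤ n) (h : sc_hasOverlap curr c2) :
    sc_loop n acc curr c2 = acc ++ [curr] := by
  obtain ⟨m, rfl⟩ : ∃ m, n = m + 1 := ⟨n - 1, by omega⟩
  simp only [sc_loop]
  rw [if_pos h]

-- one unfolding of A's while-loop: the right-slab cut at axis 0
theorem sc_stepR0 {n : Nat} {acc : List (List Int)} {x0 x1 x2 x3 x4 x5 b0 b1 b2 b3 b4 b5 : Int} {xr rest : List Int}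
    (hn : 1 ≤ n) (hno : ¬(b0 > x1 ∨ b1 < x0 ∨ b2 > x3 ∨ b3 < x2 ∨ b4 > x5 ∨ b5 < x4))
    (hr : b1 ≥ x0 ∧ b1 < x1) :
    sc_loop n acc (x0::x1::x2::x3::x4::x5::xr) (b0::b1::b2::b3::b4::b5::rest) =
    sc_loop (n-1) (acc ++ [((b1+1)::x1::x2::x3::x4::x5::xr)]) (x0::b1::x2::x3::x4::x5::xr) (b0::b1::b2::b3::b4::b5::rest) := by
  obtain ⟨m, rfl⟩ : ∃ m, n = m + 1 := ⟨n - 1, by omega⟩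
  simp only [sc_loop, sc_hasOverlap, sc_contained, sc_split, scGet]
  rw [sc_axes_cons x0 x1 x2 x3 x4 x5 xr]
  simp only [sc_split_go, scGet, List.getD, List.getElem?_cons_succ, List.getElem?_cons_zero,
    Option.getD_some]
  rw [if_neg hno, if_neg (by omega : ¬(b0 ≤ x0 ∧ b1 ≥ x1 ∧ b2 ≤ x2 ∧ b3 ≥ x3 ∧ b4 ≤ x4 ∧ b5 ≥ x5)), if_pos hr]
  simp

-- one unfolding of A's while-loop: the left-slab cut at axis 0
theorem sc_stepL0 {n : Nat} {acc : List (List Int)} {x0 x1 x2 x3 x4 x5 b0 b1 b2 b3 b4 b5 : Int} {xr rest : List Int}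
    (hn : 1 ≤ n) (hno : ¬(b0 > x1 ∨ b1 < x0 ∨ b2 > x3 ∨ b3 < x2 ∨ b4 > x5 ∨ b5 < x4))
    (hnr : ¬(b1 ≥ x0 ∧ b1 < x1)) (hl : b0 > x0 ∧ b0 ≤ x1) :
    sc_loop n acc (x0::x1::x2::x3::x4::x5::xr) (b0::b1::b2::b3::b4::b5::rest) =
    sc_loop (n-1) (acc ++ [(x0::(b0-1)::x2::x3::x4::x5::xr)]) (b0::x1::x2::x3::x4::x5::xr) (b0::b1::b2::b3::b4::b5::rest) := by
  obtain ⟨m, rfl⟩ : ∃ m, n = m + 1 := ⟨n - 1, by omega⟩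
  simp only [sc_loop, sc_hasOverlap, sc_contained, sc_split, scGet]
  rw [sc_axes_cons x0 x1 x2 x3 x4 x5 xr]
  simp only [sc_split_go, scGet, List.getD, List.getElem?_cons_succ, List.getElem?_cons_zero,
    Option.getD_some]
  rw [if_neg hno, if_neg (by omega : ¬(b0 ≤ x0 ∧ b1 ≥ x1 ∧ b2 ≤ x2 ∧ b3 ≥ x3 ∧ b4 ≤ x4 ∧ b5 ≥ x5)), if_neg hnr, if_pos hl]
  simp

-- one unfolding of A's while-loop: the right-slab cut at axis 1
theorem sc_stepR1 {n : Nat} {acc : List (List Int)} {x0 x1 x2 x3 x4 x5 b0 b1 b2 b3 b4 b5 : Int} {xr rest : List Int}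
    (hn : 1 ≤ n) (hno : ¬(b0 > x1 ∨ b1 < x0 ∨ b2 > x3 ∨ b3 < x2 ∨ b4 > x5 ∨ b5 < x4))
    (hs0 : ¬(b1 ≥ x0 ∧ b1 < x1) ∧ ¬(b0 > x0 ∧ b0 ≤ x1))
    (hr : b3 ≥ x2 ∧ b3 < x3) :
    sc_loop n acc (x0::x1::x2::x3::x4::x5::xr) (b0::b1::b2::b3::b4::b5::rest) =
    sc_loop (n-1) (acc ++ [(x0::x1::(b3+1)::x3::x4::x5::xr)]) (x0::x1::x2::b3::x4::x5::xr) (b0::b1::b2::b3::b4::b5::rest) := by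
  obtain ⟨m, rfl⟩ : ∃ m, n = m + 1 := ⟨n - 1, by omega⟩
  simp only [sc_loop, sc_hasOverlap, sc_contained, sc_split, scGet]
  rw [sc_axes_cons x0 x1 x2 x3 x4 x5 xr]
  simp only [sc_split_go, scGet, List.getD, List.getElem?_cons_succ, List.getElem?_cons_zero,
    Option.getD_some]
  rw [if_neg hno, if_neg (by omega : ¬(b0 ≤ x0 ∧ b1 ≥ x1 ∧ b2 ≤ x2 ∧ b3 ≥ x3 ∧ b4 ≤ x4 ∧ b5 ≥ x5)), if_neg hs0.1, if_neg hs0.2, if_pos hr]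
  simp

-- one unfolding of A's while-loop: the left-slab cut at axis 1
theorem sc_stepL1 {n : Nat} {acc : List (List Int)} {x0 x1 x2 x3 x4 x5 b0 b1 b2 b3 b4 b5 : Int} {xr rest : List Int}
    (hn : 1 ≤ n) (hno : ¬(b0 > x1 ∨ b1 < x0 ∨ b2 > x3 ∨ b3 < x2 ∨ b4 > x5 ∨ b5 < x4))
    (hs0 : ¬(b1 ≥ x0 ∧ b1 < x1) ∧ ¬(b0 > x0 ∧ b0 ≤ x1))
    (hnr : ¬(b3 ≥ x2 ∧ b3 < x3)) (hl : b2 > x2 ∧ b2 ≤ x3) :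
    sc_loop n acc (x0::x1::x2::x3::x4::x5::xr) (b0::b1::b2::b3::b4::b5::rest) =
    sc_loop (n-1) (acc ++ [(x0::x1::x2::(b2-1)::x4::x5::xr)]) (x0::x1::b2::x3::x4::x5::xr) (b0::b1::b2::b3::b4::b5::rest) := by
  obtain ⟨m, rfl⟩ : ∃ m, n = m + 1 := ⟨n - 1, by omega⟩
  simp only [sc_loop, sc_hasOverlap, sc_contained, sc_split, scGet]
  rw [sc_axes_cons x0 x1 x2 x3 x4 x5 xr]
  simp only [sc_split_go, scGet, List.getD, List.getElem?_cons_succ, List.getElem?_cons_zero,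
    Option.getD_some]
  rw [if_neg hno, if_neg (by omega : ¬(b0 ≤ x0 ∧ b1 ≥ x1 ∧ b2 ≤ x2 ∧ b3 ≥ x3 ∧ b4 ≤ x4 ∧ b5 ≥ x5)), if_neg hs0.1, if_neg hs0.2, if_neg hnr, if_pos hl]
  simp

-- one unfolding of A's while-loop: the right-slab cut at axis 2
theorem sc_stepR2 {n : Nat} {acc : List (List Int)} {x0 x1 x2 x3 x4 x5 b0 b1 b2 b3 b4 b5 : Int} {xr rest : List Int}
    (hn : 1 ≤ n) (hno : ¬(b0 > x1 ∨ b1 < x0 ∨ b2 > x3 ∨ b3 < x2 ∨ b4 > x5 ∨ b5 < x4))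
    (hs0 : ¬(b1 ≥ x0 ∧ b1 < x1) ∧ ¬(b0 > x0 ∧ b0 ≤ x1))
    (hs1 : ¬(b3 ≥ x2 ∧ b3 < x3) ∧ ¬(b2 > x2 ∧ b2 ≤ x3))
    (hr : b5 ≥ x4 ∧ b5 < x5) :
    sc_loop n acc (x0::x1::x2::x3::x4::x5::xr) (b0::b1::b2::b3::b4::b5::rest) =
    sc_loop (n-1) (acc ++ [(x0::x1::x2::x3::(b5+1)::x5::xr)]) (x0::x1::x2::x3::x4::b5::xr) (b0::b1::b2::b3::b4::b5::rest) := by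
  obtain ⟨m, rfl⟩ : ∃ m, n = m + 1 := ⟨n - 1, by omega⟩
  simp only [sc_loop, sc_hasOverlap, sc_contained, sc_split, scGet]
  rw [sc_axes_cons x0 x1 x2 x3 x4 x5 xr]
  simp only [sc_split_go, scGet, List.getD, List.getElem?_cons_succ, List.getElem?_cons_zero,
    Option.getD_some]
  rw [if_neg hno, if_neg (by omega : ¬(b0 ≤ x0 ∧ b1 ≥ x1 ∧ b2 ≤ x2 ∧ b3 ≥ x3 ∧ b4 ≤ x4 ∧ b5 ≥ x5)), if_neg hs0.1, if_neg hs0.2, if_neg hs1.1, if_neg hs1.2, if_pos hr]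
  simp

-- one unfolding of A's while-loop: the left-slab cut at axis 2
theorem sc_stepL2 {n : Nat} {acc : List (List Int)} {x0 x1 x2 x3 x4 x5 b0 b1 b2 b3 b4 b5 : Int} {xr rest : List Int}
    (hn : 1 ≤ n) (hno : ¬(b0 > x1 ∨ b1 < x0 ∨ b2 > x3 ∨ b3 < x2 ∨ b4 > x5 ∨ b5 < x4))
    (hs0 : ¬(b1 ≥ x0 ∧ b1 < x1) ∧ ¬(b0 > x0 ∧ b0 ≤ x1))
    (hs1 : ¬(b3 ≥ x2 ∧ b3 < x3) ∧ ¬(b2 > x2 ∧ b2 ≤ x3))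
    (hnr : ¬(b5 ≥ x4 ∧ b5 < x5)) (hl : b4 > x4 ∧ b4 ≤ x5) :
    sc_loop n acc (x0::x1::x2::x3::x4::x5::xr) (b0::b1::b2::b3::b4::b5::rest) =
    sc_loop (n-1) (acc ++ [(x0::x1::x2::x3::x4::(b4-1)::xr)]) (x0::x1::x2::x3::b4::x5::xr) (b0::b1::b2::b3::b4::b5::rest) := by
  obtain ⟨m, rfl⟩ : ∃ m, n = m + 1 := ⟨n - 1, by omega⟩
  simp only [sc_loop, sc_hasOverlap, sc_contained, sc_split, scGet]
  rw [sc_axes_cons x0 x1 x2 x3 x4 x5 xr]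
  simp only [sc_split_go, scGet, List.getD, List.getElem?_cons_succ, List.getElem?_cons_zero,
    Option.getD_some]
  rw [if_neg hno, if_neg (by omega : ¬(b0 ≤ x0 ∧ b1 ≥ x1 ∧ b2 ≤ x2 ∧ b3 ≥ x3 ∧ b4 ≤ x4 ∧ b5 ≥ x5)), if_neg hs0.1, if_neg hs0.2, if_neg hs1.1, if_neg hs1.2, if_neg hnr, if_pos hl]
  simp

-- A's while-loop exits: every axis settled and still overlapping means fully contained
theorem sc_done {n : Nat} {acc : List (List Int)} {x0 x1 x2 x3 x4 x5 b0 b1 b2 b3 b4 b5 : Int} {xr rest : List Int}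
    (hn : 1 ≤ n) (hno : ¬(b0 > x1 ∨ b1 < x0 ∨ b2 > x3 ∨ b3 < x2 ∨ b4 > x5 ∨ b5 < x4))
    (hs0 : ¬(b1 ≥ x0 ∧ b1 < x1) ∧ ¬(b0 > x0 ∧ b0 ≤ x1)) (hs1 : ¬(b3 ≥ x2 ∧ b3 < x3) ∧ ¬(b2 > x2 ∧ b2 ≤ x3)) (hs2 : ¬(b5 ≥ x4 ∧ b5 < x5) ∧ ¬(b4 > x4 ∧ b4 ≤ x5)) :
    sc_loop n acc (x0::x1::x2::x3::x4::x5::xr) (b0::b1::b2::b3::b4::b5::rest) = acc := by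
  obtain ⟨m, rfl⟩ : ∃ m, n = m + 1 := ⟨n - 1, by omega⟩
  simp only [sc_loop, sc_hasOverlap, sc_contained, sc_split, scGet]
  simp only [List.getD, List.getElem?_cons_succ, List.getElem?_cons_zero, Option.getD_some]
  rw [if_neg hno, if_pos (by omega : (b0 ≤ x0 ∧ b1 ≥ x1 ∧ b2 ≤ x2 ∧ b3 ≥ x3 ∧ b4 ≤ x4 ∧ b5 ≥ x5))]

-- one axis of B's single pass, axis 0, right branch fired, left branch fired
theorem sc_alt0TT {acc : List (List Int)} {x0 x1 x2 x3 x4 x5 b0 b1 b2 b3 b4 b5 : Int} {xr rest : List Int}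
    (hr : b1 ≥ x0 ∧ b1 < x1) (hl : b0 > x0 ∧ b0 ≤ b1) :
    sc_step (b0::b1::b2::b3::b4::b5::rest) (acc, (x0::x1::x2::x3::x4::x5::xr)) 0 = (acc ++ [((b1+1)::x1::x2::x3::x4::x5::xr)] ++ [(x0::(b0-1)::x2::x3::x4::x5::xr)], (b0::b1::x2::x3::x4::x5::xr)) := by
  simp [sc_step, scGet, hr.1, hr.2, hl.1, hl.2]

-- one axis of B's single pass, axis 0, right branch fired, left branch skipped
theorem sc_alt0TF {acc : List (List Int)} {x0 x1 x2 x3 x4 x5 b0 b1 b2 b3 b4 b5 : Int} {xr rest : List Int}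
    (hr : b1 ≥ x0 ∧ b1 < x1) (hl : ¬(b0 > x0 ∧ b0 ≤ b1)) :
    sc_step (b0::b1::b2::b3::b4::b5::rest) (acc, (x0::x1::x2::x3::x4::x5::xr)) 0 = (acc ++ [((b1+1)::x1::x2::x3::x4::x5::xr)], (x0::b1::x2::x3::x4::x5::xr)) := by
  simp [sc_step, scGet, hr.1, hr.2, hl]

-- one axis of B's single pass, axis 0, right branch skipped, left branch fired
theorem sc_alt0FT {acc : List (List Int)} {x0 x1 x2 x3 x4 x5 b0 b1 b2 b3 b4 b5 : Int} {xr rest : List Int}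
    (hr : ¬(b1 ≥ x0 ∧ b1 < x1)) (hl : b0 > x0 ∧ b0 ≤ x1) :
    sc_step (b0::b1::b2::b3::b4::b5::rest) (acc, (x0::x1::x2::x3::x4::x5::xr)) 0 = (acc ++ [(x0::(b0-1)::x2::x3::x4::x5::xr)], (b0::x1::x2::x3::x4::x5::xr)) := by
  simp [sc_step, scGet, hr, hl.1, hl.2]

-- one axis of B's single pass, axis 0, right branch skipped, left branch skipped
theorem sc_alt0FF {acc : List (List Int)} {x0 x1 x2 x3 x4 x5 b0 b1 b2 b3 b4 b5 : Int} {xr rest : List Int}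
    (hr : ¬(b1 ≥ x0 ∧ b1 < x1)) (hl : ¬(b0 > x0 ∧ b0 ≤ x1)) :
    sc_step (b0::b1::b2::b3::b4::b5::rest) (acc, (x0::x1::x2::x3::x4::x5::xr)) 0 = (acc, (x0::x1::x2::x3::x4::x5::xr)) := by
  simp [sc_step, scGet, hr, hl]

-- one axis of B's single pass, axis 1, right branch fired, left branch fired
theorem sc_alt1TT {acc : List (List Int)} {x0 x1 x2 x3 x4 x5 b0 b1 b2 b3 b4 b5 : Int} {xr rest : List Int}
    (hr : b3 ≥ x2 ∧ b3 < x3) (hl : b2 > x2 ∧ b2 ≤ b3) :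
    sc_step (b0::b1::b2::b3::b4::b5::rest) (acc, (x0::x1::x2::x3::x4::x5::xr)) 2 = (acc ++ [(x0::x1::(b3+1)::x3::x4::x5::xr)] ++ [(x0::x1::x2::(b2-1)::x4::x5::xr)], (x0::x1::b2::b3::x4::x5::xr)) := by
  simp [sc_step, scGet, hr.1, hr.2, hl.1, hl.2]

-- one axis of B's single pass, axis 1, right branch fired, left branch skipped
theorem sc_alt1TF {acc : List (List Int)} {x0 x1 x2 x3 x4 x5 b0 b1 b2 b3 b4 b5 : Int} {xr rest : List Int}
    (hr : b3 ≥ x2 ∧ b3 < x3) (hl : ¬(b2 > x2 ∧ b2 ≤ b3)) :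
    sc_step (b0::b1::b2::b3::b4::b5::rest) (acc, (x0::x1::x2::x3::x4::x5::xr)) 2 = (acc ++ [(x0::x1::(b3+1)::x3::x4::x5::xr)], (x0::x1::x2::b3::x4::x5::xr)) := by
  simp [sc_step, scGet, hr.1, hr.2, hl]

-- one axis of B's single pass, axis 1, right branch skipped, left branch fired
theorem sc_alt1FT {acc : List (List Int)} {x0 x1 x2 x3 x4 x5 b0 b1 b2 b3 b4 b5 : Int} {xr rest : List Int}
    (hr : ¬(b3 ≥ x2 ∧ b3 < x3)) (hl : b2 > x2 ∧ b2 ≤ x3) :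
    sc_step (b0::b1::b2::b3::b4::b5::rest) (acc, (x0::x1::x2::x3::x4::x5::xr)) 2 = (acc ++ [(x0::x1::x2::(b2-1)::x4::x5::xr)], (x0::x1::b2::x3::x4::x5::xr)) := by
  simp [sc_step, scGet, hr, hl.1, hl.2]

-- one axis of B's single pass, axis 1, right branch skipped, left branch skipped
theorem sc_alt1FF {acc : List (List Int)} {x0 x1 x2 x3 x4 x5 b0 b1 b2 b3 b4 b5 : Int} {xr rest : List Int}
    (hr : ¬(b3 ≥ x2 ∧ b3 < x3)) (hl : ¬(b2 > x2 ∧ b2 ≤ x3)) :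
    sc_step (b0::b1::b2::b3::b4::b5::rest) (acc, (x0::x1::x2::x3::x4::x5::xr)) 2 = (acc, (x0::x1::x2::x3::x4::x5::xr)) := by
  simp [sc_step, scGet, hr, hl]

-- one axis of B's single pass, axis 2, right branch fired, left branch fired
theorem sc_alt2TT {acc : List (List Int)} {x0 x1 x2 x3 x4 x5 b0 b1 b2 b3 b4 b5 : Int} {xr rest : List Int}
    (hr : b5 ≥ x4 ∧ b5 < x5) (hl : b4 > x4 ∧ b4 ≤ b5) :
    sc_step (b0::b1::b2::b3::b4::b5::rest) (acc, (x0::x1::x2::x3::x4::x5::xr)) 4 = (acc ++ [(x0::x1::x2::x3::(b5+1)::x5::xr)] ++ [(x0::x1::x2::x3::x4::(b4-1)::xr)], (x0::x1::x2::x3::b4::b5::xr)) := by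
  simp [sc_step, scGet, hr.1, hr.2, hl.1, hl.2]

-- one axis of B's single pass, axis 2, right branch fired, left branch skipped
theorem sc_alt2TF {acc : List (List Int)} {x0 x1 x2 x3 x4 x5 b0 b1 b2 b3 b4 b5 : Int} {xr rest : List Int}
    (hr : b5 ≥ x4 ∧ b5 < x5) (hl : ¬(b4 > x4 ∧ b4 ≤ b5)) :
    sc_step (b0::b1::b2::b3::b4::b5::rest) (acc, (x0::x1::x2::x3::x4::x5::xr)) 4 = (acc ++ [(x0::x1::x2::x3::(b5+1)::x5::xr)], (x0::x1::x2::x3::x4::b5::xr)) := by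
  simp [sc_step, scGet, hr.1, hr.2, hl]

-- one axis of B's single pass, axis 2, right branch skipped, left branch fired
theorem sc_alt2FT {acc : List (List Int)} {x0 x1 x2 x3 x4 x5 b0 b1 b2 b3 b4 b5 : Int} {xr rest : List Int}
    (hr : ¬(b5 ≥ x4 ∧ b5 < x5)) (hl : b4 > x4 ∧ b4 ≤ x5) :
    sc_step (b0::b1::b2::b3::b4::b5::rest) (acc, (x0::x1::x2::x3::x4::x5::xr)) 4 = (acc ++ [(x0::x1::x2::x3::x4::(b4-1)::xr)], (x0::x1::x2::x3::b4::x5::xr)) := by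
  simp [sc_step, scGet, hr, hl.1, hl.2]

-- one axis of B's single pass, axis 2, right branch skipped, left branch skipped
theorem sc_alt2FF {acc : List (List Int)} {x0 x1 x2 x3 x4 x5 b0 b1 b2 b3 b4 b5 : Int} {xr rest : List Int}
    (hr : ¬(b5 ≥ x4 ∧ b5 < x5)) (hl : ¬(b4 > x4 ∧ b4 ≤ x5)) :
    sc_step (b0::b1::b2::b3::b4::b5::rest) (acc, (x0::x1::x2::x3::x4::x5::xr)) 4 = (acc, (x0::x1::x2::x3::x4::x5::xr)) := by
  simp [sc_step, scGet, hr, hl]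

-- B's pass from axis 2 on, against A's loop, axes 0 and 1 settled
theorem sc_L2 {n : Nat} {acc : List (List Int)} {x0 x1 x2 x3 x4 x5 b0 b1 b2 b3 b4 b5 : Int} {xr rest : List Int}
    (hn : 3 ≤ n) (hp2 : b4 ≤ b5)
    (hno : ¬(b0 > x1 ∨ b1 < x0 ∨ b2 > x3 ∨ b3 < x2 ∨ b4 > x5 ∨ b5 < x4))
    (hs0 : ¬(b1 ≥ x0 ∧ b1 < x1) ∧ ¬(b0 > x0 ∧ b0 ≤ x1))
    (hs1 : ¬(b3 ≥ x2 ∧ b3 < x3) ∧ ¬(b2 > x2 ∧ b2 ≤ x3)) :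
    sc_loop n acc (x0::x1::x2::x3::x4::x5::xr) (b0::b1::b2::b3::b4::b5::rest) =
    (List.foldl (sc_step (b0::b1::b2::b3::b4::b5::rest)) (acc, (x0::x1::x2::x3::x4::x5::xr)) [4]).1 := by
  rw [List.foldl_cons, List.foldl_nil]
  by_cases hr : b5 ≥ x4 ∧ b5 < x5
  · by_cases hl : b4 > x4 ∧ b4 ≤ b5
    · rw [sc_alt2TT hr hl, sc_stepR2 (by omega) hno hs0 hs1 hr,
          sc_stepL2 (by omega) (by omega) hs0 hs1 (by omega) hl,
          sc_done (by omega) (by omega) hs0 hs1 (by omega)]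
    · rw [sc_alt2TF hr hl, sc_stepR2 (by omega) hno hs0 hs1 hr,
          sc_done (by omega) (by omega) hs0 hs1 (by omega)]
  · by_cases hl : b4 > x4 ∧ b4 ≤ x5
    · rw [sc_alt2FT hr hl, sc_stepL2 (by omega) hno hs0 hs1 hr hl,
          sc_done (by omega) (by omega) hs0 hs1 (by omega)]
    · rw [sc_alt2FF hr hl, sc_done (by omega) hno hs0 hs1 ⟨hr, hl⟩]

-- B's pass from axis 1 on, against A's loop, axis 0 settled
theorem sc_L1 {n : Nat} {acc : List (List Int)} {x0 x1 x2 x3 x4 x5 b0 b1 b2 b3 b4 b5 : Int} {xr rest : List Int}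
    (hn : 5 ≤ n) (hp1 : b2 ≤ b3) (hp2 : b4 ≤ b5)
    (hno : ¬(b0 > x1 ∨ b1 < x0 ∨ b2 > x3 ∨ b3 < x2 ∨ b4 > x5 ∨ b5 < x4))
    (hs0 : ¬(b1 ≥ x0 ∧ b1 < x1) ∧ ¬(b0 > x0 ∧ b0 ≤ x1)) :
    sc_loop n acc (x0::x1::x2::x3::x4::x5::xr) (b0::b1::b2::b3::b4::b5::rest) =
    (List.foldl (sc_step (b0::b1::b2::b3::b4::b5::rest)) (acc, (x0::x1::x2::x3::x4::x5::xr)) [2,4]).1 := by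
  rw [List.foldl_cons]
  by_cases hr : b3 ≥ x2 ∧ b3 < x3
  · by_cases hl : b2 > x2 ∧ b2 ≤ b3
    · rw [sc_alt1TT hr hl, sc_stepR1 (by omega) hno hs0 hr,
          sc_stepL1 (by omega) (by omega) hs0 (by omega) hl]
      exact sc_L2 (by omega) hp2 (by omega) hs0 (by omega)
    · rw [sc_alt1TF hr hl, sc_stepR1 (by omega) hno hs0 hr]
      exact sc_L2 (by omega) hp2 (by omega) hs0 (by omega)
  · by_cases hl : b2 > x2 ∧ b2 ≤ x3
    · rw [sc_alt1FT hr hl, sc_stepL1 (by omega) hno hs0 hr hl]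
      exact sc_L2 (by omega) hp2 (by omega) hs0 (by omega)
    · rw [sc_alt1FF hr hl]
      exact sc_L2 (by omega) hp2 hno hs0 ⟨hr, hl⟩

-- B's whole pass against A's loop
theorem sc_L0 {n : Nat} {acc : List (List Int)} {x0 x1 x2 x3 x4 x5 b0 b1 b2 b3 b4 b5 : Int} {xr rest : List Int}
    (hn : 7 ≤ n) (hp0 : b0 ≤ b1) (hp1 : b2 ≤ b3) (hp2 : b4 ≤ b5)
    (hno : ¬(b0 > x1 ∨ b1 < x0 ∨ b2 > x3 ∨ b3 < x2 ∨ b4 > x5 ∨ b5 < x4)) :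
    sc_loop n acc (x0::x1::x2::x3::x4::x5::xr) (b0::b1::b2::b3::b4::b5::rest) =
    (List.foldl (sc_step (b0::b1::b2::b3::b4::b5::rest)) (acc, (x0::x1::x2::x3::x4::x5::xr)) [0,2,4]).1 := by
  rw [List.foldl_cons]
  by_cases hr : b1 ≥ x0 ∧ b1 < x1
  · by_cases hl : b0 > x0 ∧ b0 ≤ b1
    · rw [sc_alt0TT hr hl, sc_stepR0 (by omega) hno hr,
          sc_stepL0 (by omega) (by omega) (by omega) hl]
      exact sc_L1 (by omega) hp1 hp2 (by omega) (by omega)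
    · rw [sc_alt0TF hr hl, sc_stepR0 (by omega) hno hr]
      exact sc_L1 (by omega) hp1 hp2 (by omega) (by omega)
  · by_cases hl : b0 > x0 ∧ b0 ≤ x1
    · rw [sc_alt0FT hr hl, sc_stepL0 (by omega) hno hr hl]
      exact sc_L1 (by omega) hp1 hp2 (by omega) (by omega)
    · rw [sc_alt0FF hr hl]
      exact sc_L1 (by omega) hp1 hp2 hno ⟨hr, hl⟩

-- ===== VERDICT (by name: the statement is the Claim_ definition above) =====
theorem substract_cube_spec : Claim_equal_substract_cube := by
  intro c1 c2 _ hpre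
  unfold Spec_substract_cube substract_cube substract_cube_alt
  obtain hsc | ⟨h1, h2, hpre3⟩ := hpre
  · have hOv : sc_hasOverlap c1 c2 := by
      simp only [sc_hasOverlap, scGet]
      tauto
    rw [if_pos hOv, sc_loop_stop (by omega) hOv]
    simp
  · by_cases hno : scGet c2 0 > scGet c1 1 ∨ scGet c2 1 < scGet c1 0 ∨ scGet c2 2 > scGet c1 3 ∨
        scGet c2 3 < scGet c1 2 ∨ scGet c2 4 > scGet c1 5 ∨ scGet c2 5 < scGet c1 4
    · rw [if_pos hno, sc_loop_stop (by omega) hno]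
      simp
    · rw [if_neg hno]
      rcases hpre3 with hbad | ⟨hp0, hp1, hp2⟩
      · exact absurd hbad hno
      · rcases c1 with _ | ⟨a0, c1⟩; · simp at h1
        rcases c1 with _ | ⟨a1, c1⟩; · simp at h1
        rcases c1 with _ | ⟨a2, c1⟩; · simp at h1
        rcases c1 with _ | ⟨a3, c1⟩; · simp at h1
        rcases c1 with _ | ⟨a4, c1⟩; · simp at h1
        rcases c1 with _ | ⟨a5, c1⟩; · simp at h1
        rcases c2 with _ | ⟨b0, c2⟩; · simp at h2
        rcases c2 with _ | ⟨b1, c2⟩; · simp at h2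
        rcases c2 with _ | ⟨b2, c2⟩; · simp at h2
        rcases c2 with _ | ⟨b3, c2⟩; · simp at h2
        rcases c2 with _ | ⟨b4, c2⟩; · simp at h2
        rcases c2 with _ | ⟨b5, c2⟩; · simp at h2
        exact sc_L0 (by omega) hp0 hp1 hp2 hno
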